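-- pv_equiv track=rewrite | github.com/herolava259/Coding-Interview-Practice | HackerRankWithAlgorithm/DynamicProgramming/PrimeDigitsSum.py | sumlastNdigit
-- ===== SOURCE A (Python) =====
-- def sumlastNdigit(n, num):
--     sum = 0
--     i = 0
--     while i < num and n >0:
--         sum += n%10
--         n = n//10
--         i += 1
--     return sum
-- ===== SOURCE B (Python) =====
-- def sumlastNdigit(n, num):
--     if n <= 0 or num <= 0:
--         return 0
--     s = str(n)
--     return sum(int(d) for d in s[-num:])
-- ===== Notes on version B (the rewrite author's own statement) =====
-- stated objective: idiomatic
-- what changed: Replaces the %10 / //10 digit-peeling while-loop with a string formatting approach: convert n to its decimal string, slice the last num characters, and sum them as digits.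
import Mathlib
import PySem

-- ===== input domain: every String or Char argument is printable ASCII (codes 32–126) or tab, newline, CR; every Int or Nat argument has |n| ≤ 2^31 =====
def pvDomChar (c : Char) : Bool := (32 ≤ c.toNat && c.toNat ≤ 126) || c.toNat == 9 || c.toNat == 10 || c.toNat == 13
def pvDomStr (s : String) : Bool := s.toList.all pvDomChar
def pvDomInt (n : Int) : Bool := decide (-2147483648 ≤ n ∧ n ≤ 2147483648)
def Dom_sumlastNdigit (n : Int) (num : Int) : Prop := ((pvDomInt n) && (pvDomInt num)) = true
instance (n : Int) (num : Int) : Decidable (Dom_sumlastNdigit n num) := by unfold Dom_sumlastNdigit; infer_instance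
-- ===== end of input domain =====

-- B replaces A's %10-and-//10 digit-peeling loop with str(n): slice the last num
-- characters of the decimal string and sum them as digits (objective: idiomatic).

-- ===== PORT A =====
-- the while-loop of A: state (sum, n, i); condition 'i < num and n > 0'
def pvLoopA (sum : Int) (n : Int) (i : Int) (num : Int) : Int :=
  if h : i < num ∧ 0 < n then
    pvLoopA (sum + PySem.Int.mod n 10) (PySem.Int.floordiv n 10) (i + 1) num
  else
    sum
termination_by (num - i).toNat
decreasing_by omega

def sumlastNdigit (n : Int) (num : Int) : Int :=
  pvLoopA 0 n 0 num

-- ===== PORT B =====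
-- int(d) for the single decimal digit char d is d's code minus 48 (exact here: str(n)
-- for n > 0 consists only of '0'..'9'); str(n) is ported as its char list toChars n.
def sumlastNdigit_alt (n : Int) (num : Int) : Int :=
  if n ≤ 0 ∨ num ≤ 0 then 0
  else
    ((PySem.List.slice (PySem.Int.toChars n) (some (-num)) none).map
      (fun c => (c.toNat : Int) - 48)).sum

-- ===== PRECONDITION & SPEC =====
def Spec_sumlastNdigit (n : Int) (num : Int) (out : Int) : Prop := out = sumlastNdigit_alt n num
instance (n : Int) (num : Int) (out : Int) : Decidable (Spec_sumlastNdigit n num out) := by unfold Spec_sumlastNdigit; infer_instance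

-- ===== CLAIM (what is proved, stated in full; the proofs are below) =====
def Claim_equal_sumlastNdigit : Prop := ∀ (n : Int) (num : Int), Dom_sumlastNdigit n num → Spec_sumlastNdigit n num (sumlastNdigit n num)

-- ===== LEMMAS AND PROOFS =====

-- A's loop adds to sum the first (num - i) entries of the little-endian digit list of n.
theorem pvLoopA_eq (k : Nat) : ∀ (sum n i num : Int), (num - i).toNat = k → 0 ≤ n →
    pvLoopA sum n i num
      = sum + ((((Nat.digits 10 n.toNat).take (num - i).toNat).sum : Nat) : Int) := by
  induction k with
  | zero =>
    intro sum n i num hk _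
    rw [pvLoopA, hk]
    have : ¬ (i < num ∧ 0 < n) := by
      intro ⟨h1, _⟩; omega
    simp [this]
  | succ k ih =>
    intro sum n i num hk hn
    rw [pvLoopA]
    by_cases h : i < num ∧ 0 < n
    · have hmod : PySem.Int.mod n 10 = ((n.toNat % 10 : Nat) : Int) := by
        have : n = ((n.toNat : Nat) : Int) := by omega
        rw [this]; exact_mod_cast PySem.Int.mod_natCast n.toNat 10
      have hdiv : PySem.Int.floordiv n 10 = ((n.toNat / 10 : Nat) : Int) := by
        have : n = ((n.toNat : Nat) : Int) := by omega
        rw [this]; exact_mod_cast PySem.Int.floordiv_natCast n.toNat 10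
      rw [dif_pos h, ih _ _ _ _ (by omega) (by rw [hdiv]; exact Int.natCast_nonneg _)]
      have hd : Nat.digits 10 n.toNat = n.toNat % 10 :: Nat.digits 10 (n.toNat / 10) := by
        exact Nat.digits_def' (by norm_num) (by omega)
      have htk : (num - i).toNat = ((num - (i + 1)).toNat) + 1 := by omega
      simp only [hmod, hdiv, Int.toNat_natCast]
      rw [hd, htk, List.take_succ_cons, List.sum_cons]
      push_cast
      ring
    · rw [dif_neg h]
      have hni : ¬ i < num ∨ n = 0 := by
        rcases lt_or_ge i num with h1 | h1
        · right; by_contra hne; exact h ⟨h1, by omega⟩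
        · left; omega
      rcases hni with h1 | h1
      · have : (num - i).toNat = 0 := by omega
        simp [this]
      · simp [h1]

-- Core's toDigitsCore, for positive n with enough fuel, writes the big-endian digits.
theorem pvToDigitsCore_eq (f : Nat) : ∀ (n : Nat) (l : List Char), 0 < n → n < f →
    Nat.toDigitsCore 10 f n l = ((Nat.digits 10 n).reverse.map Nat.digitChar) ++ l := by
  induction f with
  | zero => intro n l _ h; omega
  | succ f ih =>
    intro n l hn hf
    rw [Nat.toDigitsCore]
    have hd : Nat.digits 10 n = n % 10 :: Nat.digits 10 (n / 10) := by
      exact Nat.digits_def' (by norm_num) hn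
    by_cases h10 : n / 10 = 0
    · rw [hd, h10]
      simp
    · rw [if_neg h10]
      rw [ih (n / 10) _ (by omega) (by omega)]
      rw [hd]
      simp

theorem pvToDigits_eq (n : Nat) (hn : 0 < n) :
    Nat.toDigits 10 n = (Nat.digits 10 n).reverse.map Nat.digitChar := by
  rw [Nat.toDigits]
  rw [pvToDigitsCore_eq (n + 1) n [] hn (by omega)]
  simp

theorem pvDigitChar_toNat (d : Nat) (hd : d < 10) : ((Nat.digitChar d).toNat : Int) - 48 = (d : Int) := by
  interval_cases d <;> decide

-- ===== VERDICT (by name: the statement is the Claim_ definition above) =====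
theorem sumlastNdigit_spec : Claim_equal_sumlastNdigit := by
  intro n num _
  unfold Spec_sumlastNdigit sumlastNdigit sumlastNdigit_alt
  by_cases hcase : n ≤ 0 ∨ num ≤ 0
  · rw [if_pos hcase]
    rcases hcase with h | h
    · by_cases hn0 : n = 0
      · subst hn0
        rw [pvLoopA_eq (num - 0).toNat 0 0 0 num rfl le_rfl]
        simp
      · rw [pvLoopA]
        have : ¬ ((0:Int) < num ∧ 0 < n) := by intro ⟨_, h2⟩; omega
        simp [this]
    · rw [pvLoopA]
      have : ¬ ((0:Int) < num ∧ 0 < n) := by intro ⟨h1, _⟩; omega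
      simp [this]
  · rw [if_neg hcase]
    rw [not_or, not_le, not_le] at hcase
    obtain ⟨hn, hnum⟩ := hcase
    rw [pvLoopA_eq (num - 0).toNat 0 n 0 num rfl (by omega)]
    have h1 : PySem.Int.toChars n = Nat.toDigits 10 n.toNat := by
      unfold PySem.Int.toChars
      rw [if_neg (by omega)]
    set ds := Nat.digits 10 n.toNat with hds
    have hnum' : num = ((num.toNat : Nat) : Int) := by omega
    have hk : 0 < num.toNat := by omega
    rw [h1, pvToDigits_eq n.toNat (by omega), ← hds]
    rw [hnum', PySem.List.slice_from_neg_natCast _ _ hk]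
    have hlen : (ds.reverse.map Nat.digitChar).length = ds.length := by simp
    rw [hlen]
    rw [← List.map_drop, List.drop_reverse]
    have htk : ds.length - (ds.length - num.toNat) = min num.toNat ds.length := by omega
    rw [htk]
    have htk2 : ds.take (min num.toNat ds.length) = ds.take num.toNat := by
      rcases le_or_gt num.toNat ds.length with h | h
      · rw [min_eq_left h]
      · rw [min_eq_right (by omega), List.take_length, List.take_of_length_le (by omega)]
    rw [htk2]
    simp only [List.map_reverse, List.map_map, List.sum_reverse]
    have hsum : ((ds.take num.toNat).map ((fun c => (c.toNat : Int) - 48) ∘ Nat.digitChar)).sum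
        = ((ds.take num.toNat).map (fun d : Nat => (d : Int))).sum := by
      congr 1
      apply List.map_congr_left
      intro d hdmem
      have hd10 : d < 10 := Nat.digits_lt_base (by norm_num) (List.mem_of_mem_take hdmem)
      simpa using pvDigitChar_toNat d hd10
    rw [hsum, ← Nat.cast_list_sum]
    have : ((num.toNat : Int) - 0).toNat = num.toNat := by omega
    rw [this]
    ring
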